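-- pv_equiv track=rewrite | github.com/nixternal/CodingChallenges | AdventOfCode/2016/02.py | part_two
-- ===== SOURCE A (Python) =====
-- def part_two(data: list) -> str:
--     # Define the keypad layout
--     keypad = [
--         [0, 0, '1', 0, 0],
--         [0, '2', '3', '4', 0],
--         ['5', '6', '7', '8', '9'],
--         [0, 'A', 'B', 'C', 0],
--         [0, 0, 'D', 0, 0]
--     ]
--
--     # Initialize the starting position
--     x, y = 2, 0
--
--     # Initialize an empty passord
--     password = ''
--
--     #                   LEFT        RIGHT           UP          DOWN
--     directions = {'L': (0, -1), 'R': (0, 1), 'U': (-1, 0), 'D': (1, 0)}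
--
--     for commands in data:
--         for cmd in commands:
--             # Calculate the new position
--             dx, dy = directions.get(cmd, (0, 0))
--             new_x, new_y = x + dx, y + dy
--
--             # Check if the new position is within bound and not 0
--             if 0 <= new_x < 5 and 0 <= new_y < 5 and keypad[new_x][new_y]:
--                 x, y = new_x, new_y
--
--         # Append the corresponding keypad value to the password
--         password += keypad[x][y]
--
--     return password
-- ===== SOURCE B (Python) =====
-- def part_two(data: list) -> str:
--     # Adjacency table: (current key, command) -> neighbouring key.
--     # Moves off the diamond keypad (and unknown commands) are absent, so
--     # .get defaults to the current key.
--     moves = {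
--         ('1', 'D'): '3',
--         ('2', 'R'): '3', ('2', 'D'): '6',
--         ('3', 'U'): '1', ('3', 'L'): '2', ('3', 'R'): '4', ('3', 'D'): '7',
--         ('4', 'L'): '3', ('4', 'D'): '8',
--         ('5', 'R'): '6',
--         ('6', 'L'): '5', ('6', 'U'): '2', ('6', 'R'): '7', ('6', 'D'): 'A',
--         ('7', 'U'): '3', ('7', 'L'): '6', ('7', 'R'): '8', ('7', 'D'): 'B',
--         ('8', 'U'): '4', ('8', 'L'): '7', ('8', 'R'): '9', ('8', 'D'): 'C',
--         ('9', 'L'): '8',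
--         ('A', 'U'): '6', ('A', 'R'): 'B',
--         ('B', 'U'): '7', ('B', 'L'): 'A', ('B', 'R'): 'C', ('B', 'D'): 'D',
--         ('C', 'U'): '8', ('C', 'L'): 'B',
--         ('D', 'U'): 'B',
--     }
--     key = '5'
--     password = []
--     for commands in data:
--         for cmd in commands:
--             key = moves.get((key, cmd), key)
--         password.append(key)
--     return ''.join(password)
-- ===== Notes on version B (the rewrite author's own statement) =====
-- stated objective: idiomatic
-- what changed: Replaces the 5x5 coordinate grid, direction vectors and bounds/truthiness checks with a precomputed (key, command) -> neighbour adjacency table over the 13 key characters, tracking the current key directly and defaulting to it on edge moves or unknown commands.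
import Mathlib
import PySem

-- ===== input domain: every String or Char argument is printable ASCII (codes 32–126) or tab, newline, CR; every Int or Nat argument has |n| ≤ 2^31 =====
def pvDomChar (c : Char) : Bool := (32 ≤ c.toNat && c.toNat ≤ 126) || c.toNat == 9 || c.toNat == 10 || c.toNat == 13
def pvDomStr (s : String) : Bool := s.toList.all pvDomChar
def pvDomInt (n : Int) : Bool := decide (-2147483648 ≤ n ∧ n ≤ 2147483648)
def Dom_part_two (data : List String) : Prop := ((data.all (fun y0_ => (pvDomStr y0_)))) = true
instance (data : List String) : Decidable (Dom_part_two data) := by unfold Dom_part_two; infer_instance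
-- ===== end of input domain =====

-- B replaces A's 5×5 coordinate grid and bounds checks by a (key, command) → key
-- adjacency table with the current key as a single character (objective: idiomatic).

-- ===== PORT A =====
-- keypad: Python's falsy 0 entries become none, the one-character strings some c
-- (truthiness test `keypad[new_x][new_y]` ↔ isSome).
def keypadA : List (List (Option Char)) :=
  [[none, none, some '1', none, none],
   [none, some '2', some '3', some '4', none],
   [some '5', some '6', some '7', some '8', some '9'],
   [none, some 'A', some 'B', some 'C', none],
   [none, none, some 'D', none, none]]

-- keypad[i][j]; only evaluated under the 0 ≤ i,j < 5 guard, so the defaults are never hit.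
def kpA (i j : Int) : Option Char :=
  (PySem.List.pyGet? ((PySem.List.pyGet? keypadA i).getD []) j).getD none

-- directions.get(cmd, (0, 0))
def dirA (c : Char) : Int × Int :=
  if c = 'L' then (0, -1) else if c = 'R' then (0, 1)
  else if c = 'U' then (-1, 0) else if c = 'D' then (1, 0) else (0, 0)

-- body of A's inner loop
def stepA (p : Int × Int) (c : Char) : Int × Int :=
  let d := dirA c
  let nx := p.1 + d.1
  let ny := p.2 + d.2
  if 0 ≤ nx ∧ nx < 5 ∧ 0 ≤ ny ∧ ny < 5 ∧ (kpA nx ny).isSome then (nx, ny) else p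

-- the password string is carried as its list of characters (`+=` appends)
def part_two (data : List String) : String :=
  String.ofList
    (data.foldl
      (fun (st : (Int × Int) × List Char) commands =>
        let p := commands.toList.foldl stepA st.1
        (p, st.2 ++ (kpA p.1 p.2).toList))
      ((2, 0), [])).2

-- ===== PORT B =====
-- the dict literal, given as its items list (all 32 keys are distinct)
def movesB : PySem.Dict (Char × Char) Char := PySem.Dict.mk
  [(('1', 'D'), '3'),
   (('2', 'R'), '3'), (('2', 'D'), '6'),
   (('3', 'U'), '1'), (('3', 'L'), '2'), (('3', 'R'), '4'), (('3', 'D'), '7'),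
   (('4', 'L'), '3'), (('4', 'D'), '8'),
   (('5', 'R'), '6'),
   (('6', 'L'), '5'), (('6', 'U'), '2'), (('6', 'R'), '7'), (('6', 'D'), 'A'),
   (('7', 'U'), '3'), (('7', 'L'), '6'), (('7', 'R'), '8'), (('7', 'D'), 'B'),
   (('8', 'U'), '4'), (('8', 'L'), '7'), (('8', 'R'), '9'), (('8', 'D'), 'C'),
   (('9', 'L'), '8'),
   (('A', 'U'), '6'), (('A', 'R'), 'B'),
   (('B', 'U'), '7'), (('B', 'L'), 'A'), (('B', 'R'), 'C'), (('B', 'D'), 'D'),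
   (('C', 'U'), '8'), (('C', 'L'), 'B'),
   (('D', 'U'), 'B')]

def stepB (k : Char) (c : Char) : Char := movesB.getD (k, c) k

-- password is a list of keys, joined at the end
def part_two_alt (data : List String) : String :=
  String.ofList
    (data.foldl
      (fun (st : Char × List Char) commands =>
        let k := commands.toList.foldl stepB st.1
        (k, st.2 ++ [k]))
      ('5', [])).2

-- ===== PRECONDITION & SPEC =====
def Spec_part_two (data : List String) (out : String) : Prop := out = part_two_alt data
instance (data : List String) (out : String) : Decidable (Spec_part_two data out) := by unfold Spec_part_two; infer_instance

-- ===== CLAIM (what is proved, stated in full; the proofs are below) =====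
def Claim_equal_part_two : Prop := ∀ (data : List String), Dom_part_two data → Spec_part_two data (part_two data)

-- ===== LEMMAS AND PROOFS =====

-- the 13 reachable positions of A's grid
def validList : List (Int × Int) :=
  [(0, 2), (1, 1), (1, 2), (1, 3), (2, 0), (2, 1), (2, 2), (2, 3), (2, 4),
   (3, 1), (3, 2), (3, 3), (4, 2)]

def keyOf (p : Int × Int) : Char := (kpA p.1 p.2).getD ' '

lemma pairBeq (a b c d : Char) : ((a, b) == (c, d)) = (a == c && b == d) := rfl

lemma kp_valid : ∀ p ∈ validList, kpA p.1 p.2 = some (keyOf p) := by decide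

lemma step_agree (p : Int × Int) (hp : p ∈ validList) (c : Char) :
    stepA p c ∈ validList ∧ stepB (keyOf p) c = keyOf (stepA p c) := by
  by_cases hc : c = 'L' ∨ c = 'R' ∨ c = 'U' ∨ c = 'D'
  · rcases hc with rfl | rfl | rfl | rfl <;> fin_cases hp <;> exact ⟨by decide, by decide⟩
  · have hL : c ≠ 'L' := fun h => hc (Or.inl h)
    have hR : c ≠ 'R' := fun h => hc (Or.inr (Or.inl h))
    have hU : c ≠ 'U' := fun h => hc (Or.inr (Or.inr (Or.inl h)))
    have hD : c ≠ 'D' := fun h => hc (Or.inr (Or.inr (Or.inr h)))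
    have hd : dirA c = (0, 0) := by simp [dirA, hL, hR, hU, hD]
    have hA : stepA p c = p := by
      simp only [stepA, hd, add_zero]
      split <;> rfl
    rw [hA]
    have hL' : ('L' == c) = false := beq_eq_false_iff_ne.mpr (Ne.symm hL)
    have hR' : ('R' == c) = false := beq_eq_false_iff_ne.mpr (Ne.symm hR)
    have hU' : ('U' == c) = false := beq_eq_false_iff_ne.mpr (Ne.symm hU)
    have hD' : ('D' == c) = false := beq_eq_false_iff_ne.mpr (Ne.symm hD)
    refine ⟨hp, ?_⟩
    simp [stepB, movesB, PySem.Dict.getD_eq_get?_getD, PySem.Dict.get?, List.find?,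
      pairBeq, hL', hR', hU', hD']

lemma line_agree (cs : List Char) (p : Int × Int) (hp : p ∈ validList) :
    cs.foldl stepA p ∈ validList ∧
      cs.foldl stepB (keyOf p) = keyOf (cs.foldl stepA p) := by
  induction cs generalizing p with
  | nil => exact ⟨hp, rfl⟩
  | cons c cs ih =>
    obtain ⟨h1, h2⟩ := step_agree p hp c
    simpa [List.foldl_cons, h2] using ih (stepA p c) h1

lemma fold_agree (data : List String) (p : Int × Int) (hp : p ∈ validList)
    (acc : List Char) :
    (data.foldl
      (fun (st : (Int × Int) × List Char) commands =>
        let q := commands.toList.foldl stepA st.1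
        (q, st.2 ++ (kpA q.1 q.2).toList)) (p, acc)).2 =
    (data.foldl
      (fun (st : Char × List Char) commands =>
        let k := commands.toList.foldl stepB st.1
        (k, st.2 ++ [k])) (keyOf p, acc)).2 := by
  induction data generalizing p acc with
  | nil => rfl
  | cons s rest ih =>
    obtain ⟨h1, h2⟩ := line_agree s.toList p hp
    simp only [List.foldl_cons, h2, kp_valid _ h1, Option.toList_some]
    exact ih _ h1 _

-- ===== VERDICT (by name: the statement is the Claim_ definition above) =====
theorem part_two_spec : Claim_equal_part_two := by
  intro data _
  unfold Spec_part_two part_two part_two_alt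
  exact congrArg String.ofList (fold_agree data (2, 0) (by decide) [])
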